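-- pv_equiv track=rewrite | github.com/DancingOnAir/LeetcodePythonSolution | BitManipulation/1734_decode_xored_permutation.py | decode1
-- ===== SOURCE A (Python) =====
-- from typing import List
-- from functools import reduce
--
-- def decode1(encoded: List[int]) -> List[int]:
--     n = len(encoded)
--     total_xor = reduce(lambda a, b: a ^ b, [i for i in range(1, n + 2)])
--     res = [0] * (n + 1)
--     for i in range(0, n, 2):
--         total_xor ^= encoded[i]
--     res[-1] = total_xor
--
--     for i in range(n - 1, -1, -1):
--         res[i] = encoded[i] ^ res[i + 1]
--     return res
-- ===== SOURCE B (Python) =====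
-- from typing import List
--
-- def decode1(encoded: List[int]) -> List[int]:
--     n = len(encoded)
--     total_xor = 0
--     for v in range(1, n + 2):
--         total_xor ^= v
--     a0 = total_xor
--     for x in encoded[1::2]:
--         a0 ^= x
--     diff = [0]
--     for x in encoded:
--         diff.append(diff[-1] ^ x)
--     return [a0 ^ d for d in diff]
-- ===== Notes on version B (the rewrite author's own statement) =====
-- stated objective: alternative
-- what changed: B anchors on the FIRST element (total xor of 1..n+1 xor the odd-sliced encoded values) and builds an explicit forward prefix-XOR table, producing the result by mapping a0 over that table, instead of A's backward chained recurrence from the last element anchored by the even-indexed xor.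
import Mathlib
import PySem

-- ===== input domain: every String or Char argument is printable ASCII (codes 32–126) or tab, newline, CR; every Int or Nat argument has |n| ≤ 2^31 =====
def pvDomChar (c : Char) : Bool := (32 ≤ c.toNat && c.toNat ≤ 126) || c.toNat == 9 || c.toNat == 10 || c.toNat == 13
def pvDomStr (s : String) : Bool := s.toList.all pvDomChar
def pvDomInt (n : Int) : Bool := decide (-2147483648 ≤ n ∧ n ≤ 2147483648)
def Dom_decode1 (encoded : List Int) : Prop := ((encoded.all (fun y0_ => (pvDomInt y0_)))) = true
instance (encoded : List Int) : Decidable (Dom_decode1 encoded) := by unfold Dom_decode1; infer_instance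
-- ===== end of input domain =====

-- ===== PORT A =====
-- B differs from A by decomposition: forward prefix-XOR table + map, anchored on the first
-- element via the odd-offset slice, instead of A's backward chained recurrence from the last
-- element (objective: alternative; same O(n) cost). Python '^' is PySem.Int.bxor (exact).

-- A: 'for i in range(0, n, 2): total_xor ^= encoded[i]' — the loop reads exactly the
-- elements at even offsets (all indices in range), ported as two-at-a-time recursion (exact).
def pvEvenLoop : List Int → Int → Int
  | [], t => t
  | [x], t => PySem.Int.bxor t x
  | x :: _ :: rest, t => pvEvenLoop rest (PySem.Int.bxor t x)

-- A: 'for i in range(n-1, -1, -1): res[i] = encoded[i] ^ res[i+1]' — fills res back to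
-- front from res[-1] = last; ported as structural recursion producing the list (exact).
def pvBackFill : List Int → Int → List Int
  | [], last => [last]
  | e :: rest, last =>
    let t := pvBackFill rest last
    PySem.Int.bxor e (t.headD 0) :: t

def decode1 (encoded : List Int) : List Int :=
  let n : Int := encoded.length
  let lst := PySem.List.pyRange 1 (n + 2) 1            -- [i for i in range(1, n+2)]
  let total_xor := lst.tail.foldl (fun a b => PySem.Int.bxor a b) (lst.headD 0)  -- reduce(^, lst)
  let total_xor := pvEvenLoop encoded total_xor
  pvBackFill encoded total_xor

-- ===== PORT B =====
-- B: 'for x in encoded[1::2]: a0 ^= x' — iterates the odd-offset slice, ported as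
-- skip-one-then-two-at-a-time recursion over the list (exact).
def pvOddLoop : List Int → Int → Int
  | [], a => a
  | [_], a => a
  | _ :: y :: rest, a => pvOddLoop rest (PySem.Int.bxor a y)

-- B: 'diff = [0]; for x in encoded: diff.append(diff[-1] ^ x)' — acc is diff[-1].
def pvPrefixes : Int → List Int → List Int
  | acc, [] => [acc]
  | acc, x :: rest => acc :: pvPrefixes (PySem.Int.bxor acc x) rest

def decode1_alt (encoded : List Int) : List Int :=
  let n : Int := encoded.length
  let total_xor := (PySem.List.pyRange 1 (n + 2) 1).foldl (fun a b => PySem.Int.bxor a b) 0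
  let a0 := pvOddLoop encoded total_xor
  (pvPrefixes 0 encoded).map (fun d => PySem.Int.bxor a0 d)

-- ===== PRECONDITION & SPEC =====
def Spec_decode1 (encoded : List Int) (out : List Int) : Prop := out = decode1_alt encoded
instance (encoded : List Int) (out : List Int) : Decidable (Spec_decode1 encoded out) := by unfold Spec_decode1; infer_instance

-- ===== CLAIM (what is proved, stated in full; the proofs are below) =====
def Claim_equal_decode1 : Prop := ∀ (encoded : List Int), Dom_decode1 encoded → Spec_decode1 encoded (decode1 encoded)

-- ===== LEMMAS AND PROOFS =====

-- bxor on the Int constructors, and the XOR group laws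
theorem pvBxor_ofNat_ofNat (m n : Nat) :
    PySem.Int.bxor (Int.ofNat m) (Int.ofNat n) = Int.ofNat (m ^^^ n) := by
  simp [PySem.Int.bxor, Int.ofNat_eq_natCast]

theorem pvBxor_ofNat_negSucc (m n : Nat) :
    PySem.Int.bxor (Int.ofNat m) (Int.negSucc n) = Int.negSucc (m ^^^ n) := by
  unfold PySem.Int.bxor
  rw [if_pos (by simp [Int.ofNat_eq_natCast]), if_neg (by rw [Int.negSucc_eq]; omega)]
  rw [show -(Int.negSucc n) - 1 = (n : Int) by rw [Int.negSucc_eq]; ring]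
  simp only [Int.ofNat_eq_natCast, Int.toNat_natCast, Int.negSucc_eq]
  omega

theorem pvBxor_negSucc_ofNat (m n : Nat) :
    PySem.Int.bxor (Int.negSucc m) (Int.ofNat n) = Int.negSucc (m ^^^ n) := by
  unfold PySem.Int.bxor
  rw [if_neg (by rw [Int.negSucc_eq]; omega), if_pos (by simp [Int.ofNat_eq_natCast])]
  rw [show -(Int.negSucc m) - 1 = (m : Int) by rw [Int.negSucc_eq]; ring]
  simp only [Int.ofNat_eq_natCast, Int.toNat_natCast, Int.negSucc_eq]
  omega

theorem pvBxor_negSucc_negSucc (m n : Nat) :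
    PySem.Int.bxor (Int.negSucc m) (Int.negSucc n) = Int.ofNat (m ^^^ n) := by
  unfold PySem.Int.bxor
  rw [if_neg (by rw [Int.negSucc_eq]; omega), if_neg (by rw [Int.negSucc_eq]; omega)]
  rw [show -(Int.negSucc m) - 1 = (m : Int) by rw [Int.negSucc_eq]; ring,
    show -(Int.negSucc n) - 1 = (n : Int) by rw [Int.negSucc_eq]; ring]
  simp [Int.ofNat_eq_natCast]

theorem pvBxor_assoc (a b c : Int) :
    PySem.Int.bxor (PySem.Int.bxor a b) c = PySem.Int.bxor a (PySem.Int.bxor b c) := by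
  cases a <;> cases b <;> cases c <;>
    simp only [pvBxor_ofNat_ofNat, pvBxor_ofNat_negSucc, pvBxor_negSucc_ofNat,
      pvBxor_negSucc_negSucc, Nat.xor_assoc]

theorem pvBxor_left_comm (a b c : Int) :
    PySem.Int.bxor a (PySem.Int.bxor b c) = PySem.Int.bxor b (PySem.Int.bxor a c) := by
  rw [← pvBxor_assoc, PySem.Int.bxor_comm a b, pvBxor_assoc]

theorem pvZero_bxor (a : Int) : PySem.Int.bxor 0 a = a := by
  rw [PySem.Int.bxor_comm, PySem.Int.bxor_zero]

def pvXorAll (l : List Int) : Int := l.foldr (fun x y => PySem.Int.bxor x y) 0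

-- two-at-a-time induction principle for lists
theorem pvPairInd {α : Type} (P : List α → Prop) (h0 : P []) (h1 : ∀ x, P [x])
    (h2 : ∀ x y r, P r → P (x :: y :: r)) : ∀ l, P l
  | [] => h0
  | [x] => h1 x
  | x :: y :: r => h2 x y r (pvPairInd P h0 h1 h2 r)

theorem pvEvenLoop_shift (l : List Int) : ∀ t s : Int,
    pvEvenLoop l (PySem.Int.bxor t s) = PySem.Int.bxor t (pvEvenLoop l s) := by
  induction l using pvPairInd with
  | h0 => intro t s; simp [pvEvenLoop]
  | h1 x => intro t s; simp [pvEvenLoop, pvBxor_assoc]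
  | h2 x y r ih =>
    intro t s
    simp only [pvEvenLoop, pvBxor_assoc]
    exact ih t (PySem.Int.bxor s x)

theorem pvOddLoop_shift (l : List Int) : ∀ t s : Int,
    pvOddLoop l (PySem.Int.bxor t s) = PySem.Int.bxor t (pvOddLoop l s) := by
  induction l using pvPairInd with
  | h0 => intro t s; simp [pvOddLoop]
  | h1 x => intro t s; simp [pvOddLoop]
  | h2 x y r ih =>
    intro t s
    simp only [pvOddLoop, pvBxor_assoc]
    exact ih t (PySem.Int.bxor s y)

theorem pvParity (l : List Int) :
    PySem.Int.bxor (pvEvenLoop l 0) (pvOddLoop l 0) = pvXorAll l := by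
  induction l using pvPairInd with
  | h0 => simp [pvEvenLoop, pvOddLoop, pvXorAll]
  | h1 x => simp [pvEvenLoop, pvOddLoop, pvXorAll, pvZero_bxor]
  | h2 x y r ih =>
    have he : pvEvenLoop r (PySem.Int.bxor 0 x) = PySem.Int.bxor x (pvEvenLoop r 0) := by
      rw [pvZero_bxor, show x = PySem.Int.bxor x 0 from (PySem.Int.bxor_zero x).symm,
        pvEvenLoop_shift]
      rw [PySem.Int.bxor_zero]
    have ho : pvOddLoop r (PySem.Int.bxor 0 y) = PySem.Int.bxor y (pvOddLoop r 0) := by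
      rw [pvZero_bxor, show y = PySem.Int.bxor y 0 from (PySem.Int.bxor_zero y).symm,
        pvOddLoop_shift]
      rw [PySem.Int.bxor_zero]
    simp only [pvEvenLoop, pvOddLoop, he, ho]
    rw [show pvXorAll (x :: y :: r) = PySem.Int.bxor x (PySem.Int.bxor y (pvXorAll r)) from by
      simp [pvXorAll], ← ih]
    rw [pvBxor_assoc, pvBxor_left_comm (pvEvenLoop r 0) y]

theorem pvPrefixes_shift (r : List Int) : ∀ s a : Int,
    pvPrefixes (PySem.Int.bxor s a) r = (pvPrefixes a r).map (fun d => PySem.Int.bxor s d) := by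
  induction r with
  | nil => intro s a; simp [pvPrefixes]
  | cons x r ih =>
    intro s a
    simp only [pvPrefixes, List.map_cons, pvBxor_assoc, List.cons.injEq, true_and]
    exact ih s (PySem.Int.bxor a x)

theorem pvKey (enc : List Int) : ∀ b : Int,
    pvBackFill enc (PySem.Int.bxor b (pvXorAll enc))
      = (pvPrefixes 0 enc).map (fun d => PySem.Int.bxor b d) := by
  induction enc with
  | nil => intro b; simp [pvBackFill, pvPrefixes, pvXorAll]
  | cons e rest ih =>
    intro b
    have h1 : PySem.Int.bxor b (pvXorAll (e :: rest))
        = PySem.Int.bxor (PySem.Int.bxor b e) (pvXorAll rest) := by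
      simp [pvXorAll, pvBxor_assoc]
    have hhead : ((pvPrefixes 0 rest).map
        (fun d => PySem.Int.bxor (PySem.Int.bxor b e) d)).headD 0 = PySem.Int.bxor b e := by
      cases rest <;> simp [pvPrefixes]
    have hpre : pvPrefixes e rest = (pvPrefixes 0 rest).map (fun d => PySem.Int.bxor e d) := by
      have h := pvPrefixes_shift rest e 0
      rwa [PySem.Int.bxor_zero] at h
    simp only [pvBackFill, h1, ih (PySem.Int.bxor b e), hhead, pvPrefixes, pvZero_bxor, hpre,
      List.map_cons, List.map_map, Function.comp_def, List.cons.injEq,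
      PySem.Int.bxor_zero]
    constructor
    · rw [PySem.Int.bxor_comm b e, ← pvBxor_assoc, PySem.Int.bxor_self, pvZero_bxor]
    · apply List.map_congr_left
      intro d _
      rw [← pvBxor_assoc]

-- ===== VERDICT (by name: the statement is the Claim_ definition above) =====
theorem decode1_spec : Claim_equal_decode1 := by
  unfold Claim_equal_decode1
  intro encoded _
  unfold Spec_decode1
  simp only [decode1, decode1_alt]
  have hlen : (0 : Int) ≤ (encoded.length : Int) := Int.natCast_nonneg _
  rw [PySem.List.pyRange_one_cons (by omega)]
  simp only [List.tail_cons, List.headD_cons, List.foldl_cons, pvZero_bxor]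
  set T := (PySem.List.pyRange (1 + 1) ((encoded.length : Int) + 2) 1).foldl
    (fun a b => PySem.Int.bxor a b) 1 with hT
  have he : pvEvenLoop encoded T = PySem.Int.bxor T (pvEvenLoop encoded 0) := by
    rw [show T = PySem.Int.bxor T 0 from (PySem.Int.bxor_zero T).symm, pvEvenLoop_shift]
    rw [PySem.Int.bxor_zero]
  have ho : pvOddLoop encoded T = PySem.Int.bxor T (pvOddLoop encoded 0) := by
    rw [show T = PySem.Int.bxor T 0 from (PySem.Int.bxor_zero T).symm, pvOddLoop_shift]
    rw [PySem.Int.bxor_zero]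
  have hlast : pvEvenLoop encoded T
      = PySem.Int.bxor (pvOddLoop encoded T) (pvXorAll encoded) := by
    rw [he, ho, ← pvParity encoded, pvBxor_assoc,
      pvBxor_left_comm (pvOddLoop encoded 0) (pvEvenLoop encoded 0),
      PySem.Int.bxor_self, PySem.Int.bxor_zero]
  rw [hlast, pvKey]
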